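-- pv_equiv track=rewrite | github.com/Xingyao82/daily-news | content/scripts/karpathy_digest.py | group_by_topic
-- ===== SOURCE A (Python) =====
-- def group_by_topic(articles):
--     """按主题分组"""
--     topics = {}
--
--     for article in articles:
--         title = article.get('title', '')
--         title_lower = title.lower()
--
--         # 关键词匹配
--         if any(word in title_lower for word in ['ai', 'llm', 'gpt', 'openai', 'claude', 'model']):
--             topic = 'AI'
--         elif any(word in title_lower for word in ['code', 'programming', 'developer', 'software', 'python']):
--             topic = '编程'
--         elif any(word in title_lower for word in ['learning', 'neural', 'pytorch', 'tensorflow', 'training']):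
--             topic = '深度学习'
--         elif any(word in title_lower for word in ['startup', 'founder', 'business', 'company']):
--             topic = '创业'
--         elif any(word in title_lower for word in ['chip', 'gpu', 'hardware', 'semiconductor', 'nvidia']):
--             topic = '硬件'
--         elif any(word in title_lower for word in ['paper', 'research', 'arxiv', 'study', 'university']):
--             topic = '研究'
--         else:
--             topic = '其他'
--
--         if topic not in topics:
--             topics[topic] = []
--         topics[topic].append(article)
--
--     return topics
-- ===== SOURCE B (Python) =====
-- RULES = [
--     ('AI', ['ai', 'llm', 'gpt', 'openai', 'claude', 'model']),
--     ('编程', ['code', 'programming', 'developer', 'software', 'python']),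
--     ('深度学习', ['learning', 'neural', 'pytorch', 'tensorflow', 'training']),
--     ('创业', ['startup', 'founder', 'business', 'company']),
--     ('硬件', ['chip', 'gpu', 'hardware', 'semiconductor', 'nvidia']),
--     ('研究', ['paper', 'research', 'arxiv', 'study', 'university']),
-- ]
--
--
-- def _topic_of(article):
--     title_lower = article.get('title', '').lower()
--     for topic, words in RULES:
--         if any(w in title_lower for w in words):
--             return topic
--     return '其他'
--
--
-- def group_by_topic(articles):
--     tags = [_topic_of(a) for a in articles]
--     return {t: [a for a, tt in zip(articles, tags) if tt == t]
--             for t in dict.fromkeys(tags)}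
-- ===== Notes on version B (the rewrite author's own statement) =====
-- stated objective: alternative
-- what changed: A classifies each article with a six-branch elif ladder and mutates a dict in one pass (setdefault-style insert then append); B uses a data-driven rule table with a first-match lookup to tag every article, then builds each group in first-occurrence key order by filtering the tagged list (map-then-group, two passes).
import Mathlib
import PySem

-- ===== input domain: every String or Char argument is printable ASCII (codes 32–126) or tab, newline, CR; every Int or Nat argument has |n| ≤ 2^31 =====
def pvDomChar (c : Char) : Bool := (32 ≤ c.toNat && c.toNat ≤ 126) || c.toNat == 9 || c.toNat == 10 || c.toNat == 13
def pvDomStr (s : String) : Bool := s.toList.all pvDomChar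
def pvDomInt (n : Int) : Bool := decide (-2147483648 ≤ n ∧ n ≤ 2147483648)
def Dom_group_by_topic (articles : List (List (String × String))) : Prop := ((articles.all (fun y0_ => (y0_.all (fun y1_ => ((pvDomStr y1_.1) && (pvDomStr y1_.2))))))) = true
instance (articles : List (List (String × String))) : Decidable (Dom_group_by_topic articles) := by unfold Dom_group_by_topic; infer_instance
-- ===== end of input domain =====

-- B replaces A's single-pass elif-ladder/dict-mutation loop by a rule table plus a
-- two-pass map-then-group construction (tag every article, then build each group by a
-- filter); same return value, alternative decomposition.

-- ===== PORT A =====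
-- one loop step of A's `for article in articles:` body, mutating the dict `topics`
def group_by_topic_step (topics : PySem.Dict String (List (List (String × String))))
    (article : List (String × String)) : PySem.Dict String (List (List (String × String))) :=
  let title := (PySem.Dict.mk article).getD "title" ""
  let title_lower := PySem.Str.lower title
  let topic :=
    if ["ai", "llm", "gpt", "openai", "claude", "model"].any (fun w => PySem.Str.isIn w title_lower) then "AI"
    else if ["code", "programming", "developer", "software", "python"].any (fun w => PySem.Str.isIn w title_lower) then "编程"
    else if ["learning", "neural", "pytorch", "tensorflow", "training"].any (fun w => PySem.Str.isIn w title_lower) then "深度学习"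
    else if ["startup", "founder", "business", "company"].any (fun w => PySem.Str.isIn w title_lower) then "创业"
    else if ["chip", "gpu", "hardware", "semiconductor", "nvidia"].any (fun w => PySem.Str.isIn w title_lower) then "硬件"
    else if ["paper", "research", "arxiv", "study", "university"].any (fun w => PySem.Str.isIn w title_lower) then "研究"
    else "其他"
  let topics := if topics.contains topic then topics else topics.insert topic []
  -- topics[topic].append(article)
  topics.modify topic [] (· ++ [article])

def group_by_topic (articles : List (List (String × String))) : List (String × List (List (String × String))) :=
  (articles.foldl group_by_topic_step PySem.Dict.empty).items

-- ===== PORT B =====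
def pvRULES : List (String × List String) :=
  [("AI", ["ai", "llm", "gpt", "openai", "claude", "model"]),
   ("编程", ["code", "programming", "developer", "software", "python"]),
   ("深度学习", ["learning", "neural", "pytorch", "tensorflow", "training"]),
   ("创业", ["startup", "founder", "business", "company"]),
   ("硬件", ["chip", "gpu", "hardware", "semiconductor", "nvidia"]),
   ("研究", ["paper", "research", "arxiv", "study", "university"])]

def pvTopicOf (article : List (String × String)) : String :=
  let title_lower := PySem.Str.lower ((PySem.Dict.mk article).getD "title" "")
  -- the for-loop with early return = first rule whose word list matches, default '其他'
  ((pvRULES.find? (fun r => r.2.any (fun w => PySem.Str.isIn w title_lower))).map (·.1)).getD "其他"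

def group_by_topic_alt (articles : List (List (String × String))) : List (String × List (List (String × String))) :=
  let tags := articles.map pvTopicOf
  (PySem.List.dedup tags).map
    (fun t => (t, ((articles.zip tags).filter (fun p => p.2 == t)).map (·.1)))

-- ===== PRECONDITION & SPEC =====
def Spec_group_by_topic (articles : List (List (String × String))) (out : List (String × List (List (String × String)))) : Prop := out = group_by_topic_alt articles
instance (articles : List (List (String × String))) (out : List (String × List (List (String × String)))) : Decidable (Spec_group_by_topic articles out) := by unfold Spec_group_by_topic; infer_instance

-- ===== CLAIM (what is proved, stated in full; the proofs are below) =====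
def Claim_equal_group_by_topic : Prop := ∀ (articles : List (List (String × String))), Dom_group_by_topic articles → Spec_group_by_topic articles (group_by_topic articles)

-- ===== LEMMAS AND PROOFS =====

-- A's elif ladder picks the same topic as B's first-matching-rule lookup
theorem step_topic_eq (tl : String) :
    (if ["ai", "llm", "gpt", "openai", "claude", "model"].any (fun w => PySem.Str.isIn w tl) then "AI"
    else if ["code", "programming", "developer", "software", "python"].any (fun w => PySem.Str.isIn w tl) then "编程"
    else if ["learning", "neural", "pytorch", "tensorflow", "training"].any (fun w => PySem.Str.isIn w tl) then "深度学习"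
    else if ["startup", "founder", "business", "company"].any (fun w => PySem.Str.isIn w tl) then "创业"
    else if ["chip", "gpu", "hardware", "semiconductor", "nvidia"].any (fun w => PySem.Str.isIn w tl) then "硬件"
    else if ["paper", "research", "arxiv", "study", "university"].any (fun w => PySem.Str.isIn w tl) then "研究"
    else "其他")
    = ((pvRULES.find? (fun r => r.2.any (fun w => PySem.Str.isIn w tl))).map (·.1)).getD "其他" := by
  cases h1 : ["ai", "llm", "gpt", "openai", "claude", "model"].any (fun w => PySem.Str.isIn w tl) <;>
  cases h2 : ["code", "programming", "developer", "software", "python"].any (fun w => PySem.Str.isIn w tl) <;>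
  cases h3 : ["learning", "neural", "pytorch", "tensorflow", "training"].any (fun w => PySem.Str.isIn w tl) <;>
  cases h4 : ["startup", "founder", "business", "company"].any (fun w => PySem.Str.isIn w tl) <;>
  cases h5 : ["chip", "gpu", "hardware", "semiconductor", "nvidia"].any (fun w => PySem.Str.isIn w tl) <;>
  cases h6 : ["paper", "research", "arxiv", "study", "university"].any (fun w => PySem.Str.isIn w tl) <;>
  simp only [pvRULES, List.find?, h1, h2, h3, h4, h5, h6, Bool.false_eq_true, if_false,
    if_true, Option.map_some, Option.map_none, Option.getD_some, Option.getD_none]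

-- the `if topic not in topics: topics[topic] = []` guard is absorbed by modify
theorem setdefault_modify_eq {ν : Type} (d : PySem.Dict String ν) (t : String) (d0 : ν) (f : ν → ν) :
    (if d.contains t then d else d.insert t d0).modify t d0 f = d.modify t d0 f := by
  by_cases h : d.contains t = true
  · rw [if_pos h]
  · rw [if_neg h]
    unfold PySem.Dict.modify
    rw [PySem.Dict.getD_insert_self, PySem.Dict.insert_insert_self,
      PySem.Dict.getD_of_not_contains d d0 (by simpa using h)]

-- one step of A's loop is a plain keyed modify
theorem step_eq (topics : PySem.Dict String (List (List (String × String))))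
    (article : List (String × String)) :
    group_by_topic_step topics article = topics.modify (pvTopicOf article) [] (· ++ [article]) := by
  simp only [group_by_topic_step, pvTopicOf, step_topic_eq, setdefault_modify_eq]

-- B's zip-with-tags filter reads off the same group as A's keyed pairs filter
theorem zip_filter_eq {α κ : Type} [BEq κ] (k : α → κ) (t : κ) (xs : List α) :
    ((xs.zip (xs.map k)).filter (fun p => p.2 == t)).map (·.1)
      = ((xs.map (fun a => (k a, a))).filter (fun p => p.1 == t)).map (·.2) := by
  induction xs with
  | nil => rfl
  | cons a xs ih =>
    simp only [List.zip_cons_cons, List.map_cons, List.filter_cons]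
    by_cases h : (k a == t) = true <;> simp [h, ih]

-- ===== VERDICT (by name: the statement is the Claim_ definition above) =====
theorem group_by_topic_spec : Claim_equal_group_by_topic := by
  intro articles _
  unfold Spec_group_by_topic group_by_topic group_by_topic_alt
  simp only [PySem.List.dedup_eq_ofList]
  have hstep : articles.foldl group_by_topic_step PySem.Dict.empty
      = (articles.map (fun a => (pvTopicOf a, a))).foldl
          (fun d p => d.modify p.1 [] (· ++ [p.2])) PySem.Dict.empty := by
    rw [List.foldl_map]
    exact PySem.List.foldl_congr_mem articles _ _ _ (fun d a _ => step_eq d a)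
  rw [hstep]
  have hnodup : ((articles.map (fun a => (pvTopicOf a, a))).foldl
      (fun d p => d.modify p.1 [] (· ++ [p.2])) PySem.Dict.empty).keys.Nodup :=
    PySem.Dict.nodup_keys_foldl_modify_key _ Prod.fst [] (fun _ p => (· ++ [p.2])) _
      PySem.Dict.nodup_keys_empty
  have hkeys : ((articles.map (fun a => (pvTopicOf a, a))).foldl
      (fun d p => d.modify p.1 [] (· ++ [p.2])) PySem.Dict.empty).keys
      = PySem.Set.ofList (articles.map pvTopicOf) := by
    have := PySem.Dict.keys_foldl_modify_key (articles.map (fun a => (pvTopicOf a, a)))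
      Prod.fst [] (fun _ p => (· ++ [p.2])) PySem.Dict.empty
    simpa [PySem.Set.update_nil_left, List.map_map, Function.comp] using this
  rw [PySem.Dict.items_eq_map_keys _ hnodup [], hkeys]
  refine List.map_congr_left (fun t _ => ?_)
  rw [PySem.Dict.getD_foldl_modify_append (articles.map (fun a => (pvTopicOf a, a)))
      PySem.Dict.empty t, zip_filter_eq pvTopicOf t articles]
  simp [PySem.Dict.getD_empty]
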